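-- pv_equiv track=rewrite | github.com/splaice/maildb | src/maildb/parsing.py | remove_quoted_replies
-- ===== SOURCE A (Python) =====
-- def remove_quoted_replies(text: str) -> str:
--     """Remove lines starting with > and Outlook-style quoted blocks."""
--     lines = text.split("\n")
--     result: list[str] = []
--     for line in lines:
--         if line.startswith(">"):
--             continue
--         if line.strip() == "-----Original Message-----":
--             break
--         result.append(line)
--     return "\n".join(result)
-- ===== SOURCE B (Python) =====
-- def remove_quoted_replies(text: str) -> str:
--     """Remove lines starting with > and Outlook-style quoted blocks."""
--     sentinel = "-----Original Message-----"
--     lines = text.split("\n")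
--     stripped = [l.strip() for l in lines]
--     cut = stripped.index(sentinel) if sentinel in stripped else len(lines)
--     return "\n".join([l for l in lines[:cut] if not l.startswith(">")])
-- ===== Notes on version B (the rewrite author's own statement) =====
-- stated objective: simpler
-- what changed: Replaced A's single interleaved loop with continue/break by two independent phases: truncate the line list at the first line whose strip() equals the Outlook sentinel (found once via index), then a comprehension filtering out quote-prefixed lines from the retained prefix (valid because a quote-prefixed line can never strip to the sentinel).
import Mathlib
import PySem

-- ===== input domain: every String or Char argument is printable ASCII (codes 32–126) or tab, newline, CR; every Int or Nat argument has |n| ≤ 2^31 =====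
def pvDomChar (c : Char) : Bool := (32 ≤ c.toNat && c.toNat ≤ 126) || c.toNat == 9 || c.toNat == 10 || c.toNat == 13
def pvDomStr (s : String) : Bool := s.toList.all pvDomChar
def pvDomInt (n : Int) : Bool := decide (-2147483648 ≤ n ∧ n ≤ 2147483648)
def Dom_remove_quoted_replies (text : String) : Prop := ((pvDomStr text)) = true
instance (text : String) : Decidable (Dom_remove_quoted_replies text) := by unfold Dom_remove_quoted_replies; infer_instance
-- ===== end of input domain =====

-- B replaces A's single interleaved loop (skip quoted lines, break at the sentinel) by two
-- independent passes: truncate at the first sentinel line, then filter the prefix (objective: simpler).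

-- ===== PORT A =====
-- text.split("\n"): sep is the nonempty literal "\n", so split? is always some; [] is unreachable
def pvLinesA (text : String) : List String :=
  match PySem.Str.split? text "\n" with
  | some ls => ls
  | none => []

-- the for-loop with continue/break, as structural recursion over the lines
def pvGoA : List String → List String
  | [] => []
  | l :: rest =>
    if PySem.Str.startswith l ">" then pvGoA rest
    else if PySem.Str.strip l == "-----Original Message-----" then []
    else l :: pvGoA rest

def remove_quoted_replies (text : String) : String :=
  PySem.Str.join "\n" (pvGoA (pvLinesA text))

-- ===== PORT B =====
-- text.split("\n"), same literal nonempty separator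
def pvLinesB (text : String) : List String :=
  match PySem.Str.split? text "\n" with
  | some ls => ls
  | none => []

def remove_quoted_replies_alt (text : String) : String :=
  let lines := pvLinesB text
  let stripped := lines.map PySem.Str.strip
  let cut := (PySem.List.index? stripped "-----Original Message-----").getD lines.length
  PySem.Str.join "\n" ((lines.take cut).filter (fun l => !(PySem.Str.startswith l ">")))

-- ===== PRECONDITION & SPEC =====
def Spec_remove_quoted_replies (text : String) (out : String) : Prop := out = remove_quoted_replies_alt text
instance (text : String) (out : String) : Decidable (Spec_remove_quoted_replies text out) := by unfold Spec_remove_quoted_replies; infer_instance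

-- ===== CLAIM (what is proved, stated in full; the proofs are below) =====
def Claim_equal_remove_quoted_replies : Prop := ∀ (text : String), Dom_remove_quoted_replies text → Spec_remove_quoted_replies text (remove_quoted_replies text)

-- ===== LEMMAS AND PROOFS =====

lemma startswith_gt_chars (l : String) :
    PySem.Str.startswith l ">" = PySem.Chars.startswith l.toList ['>'] := by
  rw [PySem.Str.startswith_eq, show (">" : String).toList = ['>'] from by decide]

-- a line starting with '>' still starts with '>' after strip (strip removes only whitespace),
-- so it is never the sentinel
lemma strip_of_startswith_gt (l : String) (h : PySem.Str.startswith l ">" = true) :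
    PySem.Str.strip l ≠ "-----Original Message-----" := by
  intro hs
  rw [PySem.Str.startswith_eq] at h
  rw [PySem.Chars.startswith_iff] at h
  obtain ⟨t, ht⟩ := h
  have htl : l.toList = '>' :: t := by simpa using ht.symm
  have hmain : (PySem.Str.strip l).toList = ('-' : Char) :: "----Original Message-----".toList := by
    rw [hs]; decide
  rw [PySem.Str.toList_strip, htl] at hmain
  have hl : PySem.Chars.lstrip ('>' :: t) = '>' :: t := by
    rw [PySem.Chars.lstrip, List.dropWhile_cons,
      if_neg (by decide : ¬ PySem.Chars.isspace '>' = true)]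
  rw [PySem.Chars.strip, hl, PySem.Chars.rstrip] at hmain
  rw [show ('>' :: t).reverse = t.reverse ++ ['>'] from by simp] at hmain
  rw [List.dropWhile_append] at hmain
  split at hmain
  · exact absurd hmain (by decide)
  · rw [show (List.dropWhile PySem.Chars.isspace t.reverse ++ ['>']).reverse
        = '>' :: (List.dropWhile PySem.Chars.isspace t.reverse).reverse from by simp] at hmain
    have hh := congrArg List.head? hmain
    simp at hh

-- the loop of A equals B's truncate-then-filter on any list of lines
lemma goA_eq (ls : List String) :
    pvGoA ls =
      (ls.take ((PySem.List.index? (ls.map PySem.Str.strip) "-----Original Message-----").getD ls.length)).filter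
        (fun l => !(PySem.Str.startswith l ">")) := by
  induction ls with
  | nil => rfl
  | cons l rest ih =>
    by_cases hgt : PySem.Str.startswith l ">" = true
    · have hne : PySem.Str.strip l ≠ "-----Original Message-----" := strip_of_startswith_gt l hgt
      have hgtc : PySem.Chars.startswith l.toList ['>'] = true := by
        rw [← startswith_gt_chars]; exact hgt
      rw [pvGoA, if_pos hgt, List.map_cons, PySem.List.index?_cons_of_ne _ hne]
      cases hidx : PySem.List.index? (rest.map PySem.Str.strip) "-----Original Message-----" with
      | none => rw [hidx] at ih; simpa [hgtc] using ih
      | some i => rw [hidx] at ih; simpa [hgtc, List.take_succ_cons] using ih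
    · have hgt' : PySem.Str.startswith l ">" = false := (Bool.not_eq_true _).mp hgt
      have hgtc : PySem.Chars.startswith l.toList ['>'] = false := by
        rw [← startswith_gt_chars]; exact hgt'
      by_cases hs : PySem.Str.strip l = "-----Original Message-----"
      · rw [pvGoA, if_neg hgt, if_pos (by simp [hs]), List.map_cons, hs,
          PySem.List.index?_cons_self]
        simp
      · rw [pvGoA, if_neg hgt, if_neg (by simp [hs]), List.map_cons,
          PySem.List.index?_cons_of_ne _ hs]
        cases hidx : PySem.List.index? (rest.map PySem.Str.strip) "-----Original Message-----" with
        | none =>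
          rw [hidx] at ih
          simp only [Option.map_none, Option.getD_none, List.length_cons, List.take_succ_cons,
            List.filter_cons] at ih ⊢
          simp [hgtc] at ih ⊢
          exact ih
        | some i =>
          rw [hidx] at ih
          simp only [Option.map_some, Option.getD_some, List.take_succ_cons,
            List.filter_cons] at ih ⊢
          simp [hgtc] at ih ⊢
          exact ih

-- ===== VERDICT (by name: the statement is the Claim_ definition above) =====
theorem remove_quoted_replies_spec : Claim_equal_remove_quoted_replies := by
  intro text _
  show remove_quoted_replies text = remove_quoted_replies_alt text
  unfold remove_quoted_replies remove_quoted_replies_alt pvLinesA pvLinesB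
  cases PySem.Str.split? text "\n" with
  | none => rfl
  | some ls => exact congrArg (PySem.Str.join "\n") (goA_eq ls)
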